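-- pv_equiv track=rewrite | github.com/keithhenning/technical-interviews | python/08_023.py | min_team_members
-- ===== SOURCE A (Python) =====
-- def min_team_members(intervals, K):
--    # Sort intervals by start time
--    intervals.sort(key=lambda x: x[0])
--
--    # Keep track of covered intervals
--    covered = [False] * len(intervals)
--    team_count = 0
--
--    while not all(covered):
--       team_count += 1
--
--       # Find the earliest uncovered interval
--       earliest_uncovered = None
--       for i in range(len(intervals)):
--          if not covered[i]:
--             earliest_uncovered = i
--             break
--
--       if earliest_uncovered is None:
--          break
--
--       # Start shift at the beginning of the earliest uncovered
--       shift_start = intervals[earliest_uncovered][0]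
--       shift_end = shift_start + K
--
--       # Cover all intervals that fit within this shift
--       for i in range(len(intervals)):
--          if (not covered[i] and
--              intervals[i][0] >= shift_start and
--              intervals[i][1] <= shift_end):
--             covered[i] = True
--
--    return team_count
--
-- intervals = [[1, 3], [2, 5], [6, 8], [8, 10], [11, 12]]
--
-- K = 5
-- ===== SOURCE B (Python) =====
-- def min_team_members(intervals, K):
--     # Same in-place sort as A (side effect preserved); then a single linear pass:
--     # sorted by start, an interval needs a new shift iff its end exceeds the
--     # current shift's end; the new shift starts at that interval's start.
--     intervals.sort(key=lambda x: x[0])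
--     team_count = 0
--     shift_end = None
--     for iv in intervals:
--         if shift_end is None or iv[1] > shift_end:
--             team_count += 1
--             shift_end = iv[0] + K
--     return team_count
-- ===== Notes on version B (the rewrite author's own statement) =====
-- stated objective: simpler
-- what changed: A repeatedly rescans the whole list per shift with a covered-flags array; B does the same sort and then a single linear pass keeping only the current shift's end, opening a new shift exactly when an interval's end exceeds it.
import Mathlib
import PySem

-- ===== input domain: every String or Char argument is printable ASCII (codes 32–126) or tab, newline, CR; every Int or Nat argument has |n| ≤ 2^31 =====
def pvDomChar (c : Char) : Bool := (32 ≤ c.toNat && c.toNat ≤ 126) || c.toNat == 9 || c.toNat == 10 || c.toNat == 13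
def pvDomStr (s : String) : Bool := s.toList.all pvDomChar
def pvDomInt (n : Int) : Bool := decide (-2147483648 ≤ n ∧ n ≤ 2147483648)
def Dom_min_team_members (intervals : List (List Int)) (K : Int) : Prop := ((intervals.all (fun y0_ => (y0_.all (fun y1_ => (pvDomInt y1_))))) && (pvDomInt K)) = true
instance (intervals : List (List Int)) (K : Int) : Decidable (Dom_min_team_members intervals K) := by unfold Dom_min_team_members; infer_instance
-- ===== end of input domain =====

-- B replaces A's repeated rescans of a covered-flags array by one linear pass after the
-- same sort (objective: simpler). Both A and B sort `intervals` in place in Python; the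
-- equivalence proved here is about the return value (the mutation is identical anyway).

-- ===== PORT A =====
-- the inner covering for-loop of A: set covered[i] for every uncovered interval that fits the shift
def pvCoverPass (shift_start shift_end : Int) (xs : List (List Int)) (covered : List Bool) : List Bool :=
  List.zipWith (fun x c => c || (!c && decide (x.getD 0 0 ≥ shift_start) && decide (x.getD 1 0 ≤ shift_end))) xs covered

-- A's while-loop; fuel bounds the iterations (under Pre_ each iteration covers the earliest
-- uncovered interval, so length+1 iterations always suffice; outside Pre_ the Python loops forever)
def pvLoopA (K : Int) (xs : List (List Int)) : Nat → List Bool → Int → Int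
  | 0, _, count => count
  | fuel+1, covered, count =>
    if covered.all (fun c => c) then count
    else
      match covered.findIdx? (fun c => c == false) with
      | none => count + 1   -- Python's dead `break` after the increment
      | some i =>
          let shift_start := (xs.getD i []).getD 0 0   -- intervals[i][0]; in range under Pre_
          let shift_end := shift_start + K
          pvLoopA K xs fuel (pvCoverPass shift_start shift_end xs covered) (count + 1)

def min_team_members (intervals : List (List Int)) (K : Int) : Int :=
  let xs := PySem.List.sorted intervals (fun x => x.getD 0 0) false
  pvLoopA K xs (xs.length + 1) (List.replicate xs.length false) 0

-- ===== PORT B =====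
-- B's loop body: open a new shift iff no shift yet or the interval's end exceeds the current shift end
def pvStepB (K : Int) (st : Int × Option Int) (iv : List Int) : Int × Option Int :=
  match st.2 with
  | none => (st.1 + 1, some (iv.getD 0 0 + K))
  | some E => if iv.getD 1 0 > E then (st.1 + 1, some (iv.getD 0 0 + K)) else st

def min_team_members_alt (intervals : List (List Int)) (K : Int) : Int :=
  let xs := PySem.List.sorted intervals (fun x => x.getD 0 0) false
  (xs.foldl (pvStepB K) ((0 : Int), (none : Option Int))).1

-- ===== PRECONDITION & SPEC =====
-- Pre_ excludes exactly the inputs on which A does not return: an interval with fewer than two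
-- entries makes A raise IndexError, and an interval with x[1] > x[0] + K is never covered, so
-- A's while-loop runs forever.
def Pre_min_team_members (intervals : List (List Int)) (K : Int) : Prop :=
  ∀ x ∈ intervals, 2 ≤ x.length ∧ x.getD 1 0 ≤ x.getD 0 0 + K
instance (intervals : List (List Int)) (K : Int) : Decidable (Pre_min_team_members intervals K) := by
  unfold Pre_min_team_members; infer_instance

def pvWitness_min_team_members : List (List Int) × Int := ([[1, 3], [2, 5], [6, 8], [8, 10], [11, 12]], 5)

def Spec_min_team_members (intervals : List (List Int)) (K : Int) (out : Int) : Prop := out = min_team_members_alt intervals K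
instance (intervals : List (List Int)) (K : Int) (out : Int) : Decidable (Spec_min_team_members intervals K out) := by unfold Spec_min_team_members; infer_instance

-- ===== CLAIM (what is proved, stated in full; the proofs are below) =====
def Claim_equal_min_team_members : Prop := ∀ (intervals : List (List Int)) (K : Int), Dom_min_team_members intervals K → Pre_min_team_members intervals K → Spec_min_team_members intervals K (min_team_members intervals K)

-- ===== LEMMAS AND PROOFS =====
def pvStart (x : List Int) : Int := x.getD 0 0
def pvEnd (x : List Int) : Int := x.getD 1 0

-- abstract count of shifts opened by B's pass, as structural recursion
def pvShifts (K : Int) : Option Int → List (List Int) → Int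
  | _, [] => 0
  | none, x :: l => 1 + pvShifts K (some (pvStart x + K)) l
  | some E, x :: l => if pvEnd x > E then 1 + pvShifts K (some (pvStart x + K)) l else pvShifts K (some E) l

-- canonical covered array after opening shifts up to threshold E
def pvCov (E? : Option Int) (xs : List (List Int)) : List Bool :=
  match E? with
  | none => List.replicate xs.length false
  | some E => xs.map (fun x => decide (pvEnd x ≤ E))

def pvUncov (E? : Option Int) (xs : List (List Int)) : Nat :=
  match E? with
  | none => xs.length
  | some E => (xs.filter (fun x => decide (E < pvEnd x))).length

theorem pv_foldB (K : Int) : ∀ (l : List (List Int)) (c : Int) (E? : Option Int),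
    (l.foldl (pvStepB K) (c, E?)).1 = c + pvShifts K E? l := by
  intro l
  induction l with
  | nil => intro c E?; simp [pvShifts]
  | cons x t ih =>
      intro c E?
      cases E? with
      | none =>
          simp only [List.foldl_cons, pvStepB, pvShifts, pvStart]
          rw [ih]; ring
      | some E =>
          by_cases h : x.getD 1 0 > E
          · simp only [List.foldl_cons, pvStepB, pvShifts, pvEnd, pvStart, if_pos h]
            rw [ih]; ring
          · simp only [List.foldl_cons, pvStepB, pvShifts, pvEnd, if_neg h]
            rw [ih]

theorem pv_zipWith_map {α β : Type} (g : α → Bool → β) (f : α → Bool) :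
    ∀ (l : List α), List.zipWith g l (l.map f) = l.map (fun x => g x (f x)) := by
  intro l; induction l with
  | nil => rfl
  | cons x t ih => simp [ih]

theorem pv_zipWith_replicate {α β : Type} (g : α → Bool → β) (b : Bool) :
    ∀ (l : List α), List.zipWith g l (List.replicate l.length b) = l.map (fun x => g x b) := by
  intro l; induction l with
  | nil => rfl
  | cons x t ih => simp [List.replicate, ih]

theorem pv_shifts_skip (K E : Int) : ∀ (P l : List (List Int)), (∀ y ∈ P, pvEnd y ≤ E) →
    pvShifts K (some E) (P ++ l) = pvShifts K (some E) l := by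
  intro P
  induction P with
  | nil => intro l _; rfl
  | cons y t ih =>
      intro l h
      have hy : pvEnd y ≤ E := h y (by simp)
      simp [pvShifts, show ¬ (pvEnd y > E) by omega]
      exact ih l (fun z hz => h z (by simp [hz]))

theorem pv_shifts_all (K E : Int) : ∀ (l : List (List Int)), (∀ y ∈ l, pvEnd y ≤ E) →
    pvShifts K (some E) l = 0 := by
  intro l h
  have := pv_shifts_skip K E l [] h
  simpa using this

theorem pv_filter_mono (E E' : Int) (h : E ≤ E') : ∀ (l : List (List Int)),
    (l.filter (fun x => decide (E' < pvEnd x))).length ≤ (l.filter (fun x => decide (E < pvEnd x))).length := by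
  intro l; induction l with
  | nil => simp
  | cons x t ih =>
      by_cases hx : E' < pvEnd x
      · simp [List.filter, hx, show E < pvEnd x by omega]; omega
      · by_cases hx2 : E < pvEnd x <;> simp [List.filter, hx, hx2] <;> omega

-- first uncovered interval: decomposition of the covered array's findIdx?
theorem pv_find_decomp (E : Int) : ∀ (L : List (List Int)), (∃ x ∈ L, E < pvEnd x) →
    ∃ P x S, L = P ++ x :: S ∧ (∀ y ∈ P, pvEnd y ≤ E) ∧ E < pvEnd x ∧
      ((L.map (fun x => decide (pvEnd x ≤ E))).findIdx? (fun c => c == false) = some P.length) ∧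
      L.getD P.length [] = x := by
  intro L
  induction L with
  | nil => intro h; simp at h
  | cons z t ih =>
      intro h
      by_cases hz : E < pvEnd z
      · exact ⟨[], z, t, by simp, by simp, hz, by simp [List.findIdx?_cons, show ¬ (pvEnd z ≤ E) by omega], by simp⟩
      · have ht : ∃ x ∈ t, E < pvEnd x := by
          rcases h with ⟨x, hx, hex⟩
          rcases List.mem_cons.mp hx with rfl | hx'
          · omega
          · exact ⟨x, hx', hex⟩
        rcases ih ht with ⟨P, x, S, hL, hP, hx, hfind, hget⟩
        refine ⟨z :: P, x, S, by simp [hL], ?_, hx, ?_, ?_⟩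
        · intro y hy
          rcases List.mem_cons.mp hy with rfl | hy'
          · omega
          · exact hP y hy'
        · simp only [List.findIdx?_map] at hfind
          simp [List.findIdx?_cons, show pvEnd z ≤ E by omega, List.findIdx?_map]
          convert hfind using 2
          funext y
          simp
        · simpa using hget

theorem pv_main (K : Int) : ∀ (fuel : Nat) (L : List (List Int)) (E? : Option Int) (c : Int),
    (∀ x ∈ L, pvEnd x ≤ pvStart x + K) →
    L.Pairwise (fun a b => pvStart a ≤ pvStart b) →
    pvUncov E? L < fuel →
    pvLoopA K L fuel (pvCov E? L) c = c + pvShifts K E? L := by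
  intro fuel
  induction fuel with
  | zero => intro L E? c _ _ hf; omega
  | succ fuel ih =>
      intro L E? c hpre hsort hf
      cases E? with
      | none =>
          cases L with
          | nil => simp [pvLoopA, pvCov, pvShifts]
          | cons x t =>
              have hall : ¬ (((pvCov none (x :: t)).all (fun c => c)) = true) := by
                simp [pvCov, List.replicate]
              have hfind : (pvCov none (x :: t)).findIdx? (fun c => c == false) = some 0 := by
                simp [pvCov, List.replicate, List.findIdx?_cons]
              set E' : Int := pvStart x + K with hE'
              have hcov : pvCoverPass (pvStart x) E' (x :: t) (pvCov none (x :: t)) = pvCov (some E') (x :: t) := by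
                unfold pvCoverPass pvCov
                rw [pv_zipWith_replicate]
                apply List.map_congr_left
                intro y hy
                have hsy : pvStart x ≤ pvStart y := by
                  rcases List.mem_cons.mp hy with rfl | hy'
                  · exact le_refl _
                  · exact (List.pairwise_cons.mp hsort).1 y hy'
                show (false || (!false && decide (y.getD 0 0 ≥ pvStart x) && decide (y.getD 1 0 ≤ E'))) = decide (pvEnd y ≤ E')
                rw [decide_eq_true (show y.getD 0 0 ≥ pvStart x from hsy)]
                simp [pvEnd]
              have hstep : pvLoopA K (x :: t) (fuel + 1) (pvCov none (x :: t)) c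
                  = pvLoopA K (x :: t) fuel (pvCoverPass (pvStart x) E' (x :: t) (pvCov none (x :: t))) (c + 1) := by
                conv_lhs => rw [pvLoopA]
                rw [if_neg hall, hfind]
                rfl
              have hfuel : pvUncov (some E') (x :: t) < fuel := by
                have hx : pvEnd x ≤ E' := by rw [hE']; exact hpre x (by simp)
                have h1 : pvUncov (some E') (x :: t) ≤ t.length := by
                  simp [pvUncov, List.filter, show ¬ (E' < pvEnd x) by omega]
                  exact List.length_filter_le _ t
                have h2 : (x :: t).length < fuel + 1 := by simpa [pvUncov] using hf
                simp at h2; omega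
              rw [hstep, hcov, ih (x :: t) (some E') (c + 1) hpre hsort hfuel]
              have hx : pvEnd x ≤ E' := by rw [hE']; exact hpre x (by simp)
              simp [pvShifts, show ¬ (pvEnd x > E') by omega]
              ring
      | some E =>
          by_cases hall : ∀ y ∈ L, pvEnd y ≤ E
          · have hA : ((pvCov (some E) L).all (fun c => c)) = true := by
              simp [pvCov]
              intro y hy; exact hall y hy
            conv_lhs => rw [pvLoopA]
            rw [if_pos hA, pv_shifts_all K E L hall]
            ring
          · push Not at hall
            rcases hall with ⟨x0, hx0, hx0e⟩
            rcases pv_find_decomp E L ⟨x0, hx0, by omega⟩ with ⟨P, x, S, hL, hP, hx, hfind, hget⟩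
            have hxK : pvEnd x ≤ pvStart x + K := hpre x (by rw [hL]; simp)
            set E' : Int := pvStart x + K with hE'
            have hEE' : E < E' := by omega
            have hAall : ¬ (((pvCov (some E) L).all (fun c => c)) = true) := by
              simp [pvCov]
              exact ⟨x, by rw [hL]; simp, by omega⟩
            have hSstart : ∀ y ∈ S, pvStart x ≤ pvStart y := by
              have hps : (P ++ x :: S).Pairwise (fun a b => pvStart a ≤ pvStart b) := hL ▸ hsort
              have := (List.pairwise_append.mp hps).2.1
              exact (List.pairwise_cons.mp this).1
            have hcov : pvCoverPass (pvStart x) E' L (pvCov (some E) L) = pvCov (some E') L := by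
              unfold pvCoverPass pvCov
              rw [pv_zipWith_map]
              apply List.map_congr_left
              intro y hy
              show (decide (pvEnd y ≤ E) || (!(decide (pvEnd y ≤ E)) && decide (y.getD 0 0 ≥ pvStart x) && decide (y.getD 1 0 ≤ E'))) = decide (pvEnd y ≤ E')
              by_cases h1 : pvEnd y ≤ E
              · rw [decide_eq_true h1, decide_eq_true (show pvEnd y ≤ E' from by omega)]
                simp
              · have hsy : pvStart x ≤ pvStart y := by
                  rw [hL] at hy
                  rcases List.mem_append.mp hy with hp | hxs
                  · exact absurd (hP y hp) h1
                  · rcases List.mem_cons.mp hxs with rfl | hs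
                    · exact le_refl _
                    · exact hSstart y hs
                rw [decide_eq_false h1, decide_eq_true (show y.getD 0 0 ≥ pvStart x from hsy)]
                simp [pvEnd]
            have hstep : pvLoopA K L (fuel + 1) (pvCov (some E) L) c
                = pvLoopA K L fuel (pvCoverPass (pvStart x) E' L (pvCov (some E) L)) (c + 1) := by
              conv_lhs => rw [pvLoopA]
              rw [if_neg hAall]
              have hfi : (pvCov (some E) L).findIdx? (fun c => c == false) = some P.length := by
                simpa [pvCov] using hfind
              rw [hfi]
              show pvLoopA K L fuel (pvCoverPass ((L.getD P.length []).getD 0 0) ((L.getD P.length []).getD 0 0 + K) L (pvCov (some E) L)) (c + 1) = _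
              rw [hget]
              rfl
            have hfuel : pvUncov (some E') L < fuel := by
              have h1 : pvUncov (some E') L = (S.filter (fun y => decide (E' < pvEnd y))).length := by
                simp only [pvUncov, hL, List.filter_append, List.filter_cons, List.length_append]
                have hP' : (P.filter (fun y => decide (E' < pvEnd y))).length = 0 := by
                  rw [List.length_eq_zero_iff, List.filter_eq_nil_iff]
                  intro y hy; have := hP y hy; simp; omega
                simp [hP', show ¬ (E' < pvEnd x) by omega]
              have h2 : pvUncov (some E) L = (S.filter (fun y => decide (E < pvEnd y))).length + 1 := by
                simp only [pvUncov, hL, List.filter_append, List.filter_cons, List.length_append]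
                have hP' : (P.filter (fun y => decide (E < pvEnd y))).length = 0 := by
                  rw [List.length_eq_zero_iff, List.filter_eq_nil_iff]
                  intro y hy; have := hP y hy; simp; omega
                simp [hP', show E < pvEnd x from hx]
              have h3 := pv_filter_mono E E' (by omega) S
              have h4 : pvUncov (some E) L < fuel + 1 := hf
              omega
            rw [hstep, hcov, ih L (some E') (c + 1) hpre hsort hfuel]
            have hs1 : pvShifts K (some E) L = 1 + pvShifts K (some E') S := by
              rw [hL, pv_shifts_skip K E P _ hP]
              simp [pvShifts, show pvEnd x > E from hx, hE']
            have hs2 : pvShifts K (some E') L = pvShifts K (some E') S := by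
              rw [hL, pv_shifts_skip K E' P _ (fun y hy => by have := hP y hy; omega)]
              simp [pvShifts, show ¬ (pvEnd x > E') by omega]
            rw [hs1, hs2]; ring

-- ===== VERDICT (by name: the statement is the Claim_ definition above) =====
theorem min_team_members_spec : Claim_equal_min_team_members := by
  intro intervals K _ hpre
  unfold Spec_min_team_members min_team_members min_team_members_alt
  set xs := PySem.List.sorted intervals (fun x => x.getD 0 0) false with hxs
  have hpre' : ∀ x ∈ xs, pvEnd x ≤ pvStart x + K := by
    intro x hx
    exact (hpre x ((PySem.List.mem_sorted _ _ _ _).mp hx)).2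
  have hsort : xs.Pairwise (fun a b => pvStart a ≤ pvStart b) :=
    PySem.List.sorted_pairwise intervals (fun x => x.getD 0 0)
  have hmain := pv_main K (xs.length + 1) xs none 0 hpre' hsort (by simp [pvUncov])
  rw [pv_foldB]
  simpa [pvCov] using hmain
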